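-- pv_equiv track=rewrite | github.com/Lum1naT/django-bootstrap-ftizol-cms | django_bootstrap_ftizol_cms/main/admin.py | add_thousand_separator
-- ===== SOURCE A (Python) =====
-- def add_thousand_separator(number):
--     result = ""
--     loop_string = str(number)
--     index = 0
--     total_numbers = 0
--     for number in loop_string:
--         result += number
--         index += 1
--         total_numbers += 1
--         if index == 3 and total_numbers != len(loop_string):
--             result += ","
--             index = 0
--
--     return result
-- ===== SOURCE B (Python) =====
-- def add_thousand_separator(number):
--     def chunks(s):
--         return [s] if len(s) <= 3 else [s[:3]] + chunks(s[3:])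
--     return ','.join(chunks(str(number)))
-- ===== Notes on version B (the rewrite author's own statement) =====
-- stated objective: simpler
-- what changed: B splits str(number) into blocks of three characters left-to-right and joins them with commas, instead of A's character-by-character accumulation with index/total counters.
import Mathlib
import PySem

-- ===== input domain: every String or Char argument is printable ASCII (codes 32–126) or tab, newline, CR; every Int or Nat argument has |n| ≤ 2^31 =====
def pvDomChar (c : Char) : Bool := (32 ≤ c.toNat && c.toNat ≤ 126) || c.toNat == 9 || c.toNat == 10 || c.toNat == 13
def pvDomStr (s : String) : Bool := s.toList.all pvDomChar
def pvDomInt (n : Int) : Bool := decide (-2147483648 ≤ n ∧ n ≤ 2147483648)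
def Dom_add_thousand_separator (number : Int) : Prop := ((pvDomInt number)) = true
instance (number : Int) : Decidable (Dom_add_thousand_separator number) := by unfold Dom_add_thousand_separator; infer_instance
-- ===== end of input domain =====

-- B replaces A's per-character counter loop with recursive 3-character chunking + join (objective: simpler).
-- ===== PORT A =====
-- A's string accumulator 'result' is ported as a List Char built by appends; String.mk at the end.
def loopA : List Char → List Char → Int → Int → Int → List Char
  | [], res, _, _, _ => res
  | c :: rest, res, index, total, n =>
    let res := res ++ [c]
    let index := index + 1
    let total := total + 1
    if index = 3 ∧ total ≠ n then loopA rest (res ++ [',']) 0 total n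
    else loopA rest res index total n

def add_thousand_separator (number : Int) : String :=
  let loop_string := PySem.Int.toChars number
  String.mk (loopA loop_string [] 0 0 (loop_string.length : Int))

-- ===== PORT B =====
-- chunks s = [s] if len(s) <= 3 else [s[:3]] + chunks(s[3:])
def chunksB (l : List Char) : List (List Char) :=
  if l.length ≤ 3 then [l] else l.take 3 :: chunksB (l.drop 3)
termination_by l.length
decreasing_by simp [List.length_drop]; omega

-- ','.join(...)
def joinComma : List (List Char) → List Char
  | [] => []
  | [x] => x
  | x :: xs => x ++ ',' :: joinComma xs

def add_thousand_separator_alt (number : Int) : String :=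
  String.mk (joinComma (chunksB (PySem.Int.toChars number)))

-- ===== PRECONDITION & SPEC =====
def Spec_add_thousand_separator (number : Int) (out : String) : Prop := out = add_thousand_separator_alt number
instance (number : Int) (out : String) : Decidable (Spec_add_thousand_separator number out) := by unfold Spec_add_thousand_separator; infer_instance

-- ===== CLAIM (what is proved, stated in full; the proofs are below) =====
def Claim_equal_add_thousand_separator : Prop := ∀ (number : Int), Dom_add_thousand_separator number → Spec_add_thousand_separator number (add_thousand_separator number)

-- ===== LEMMAS AND PROOFS =====
lemma chunksB_ne_nil (l : List Char) : chunksB l ≠ [] := by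
  unfold chunksB; split <;> simp

lemma joinComma_cons (x : List Char) (xs : List (List Char)) (h : xs ≠ []) :
    joinComma (x :: xs) = x ++ ',' :: joinComma xs := by
  cases xs with
  | nil => exact absurd rfl h
  | cons y ys => rfl

lemma loopA_eq : ∀ (N : Nat) (l : List Char), l.length ≤ N →
    ∀ (res : List Char) (tot n : Int), n = tot + (l.length : Int) →
    loopA l res 0 tot n = res ++ joinComma (chunksB l) := by
  intro N
  induction N with
  | zero =>
    intro l hl res tot n hn
    have : l = [] := List.eq_nil_of_length_eq_zero (Nat.le_zero.mp hl)
    subst this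
    simp [loopA, chunksB, joinComma]
  | succ N ih =>
    intro l hl res tot n hn
    match l with
    | [] => simp [loopA, chunksB, joinComma]
    | [a] =>
      simp only [List.length_cons, List.length_nil] at hn
      simp [loopA, chunksB, joinComma]
    | [a, b] =>
      simp [loopA, chunksB, joinComma]
    | [a, b, c] =>
      simp only [List.length_cons, List.length_nil] at hn
      simp only [loopA]
      rw [if_neg (by omega : ¬ ((0:Int) + 1 + 1 + 1 = 3 ∧ tot + 1 + 1 + 1 ≠ n))]
      simp [loopA, chunksB, joinComma]
    | a :: b :: c :: d :: t =>
      simp only [List.length_cons] at hn hl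
      have hcond : ((0:Int) + 1 + 1 + 1 = 3 ∧ tot + 1 + 1 + 1 ≠ n) := by
        constructor
        · norm_num
        · push_cast at hn; omega
      have hstep : loopA (a :: b :: c :: d :: t) res 0 tot n =
          loopA (d :: t) (res ++ [a, b, c, ',']) 0 (tot + 1 + 1 + 1) n := by
        simp [loopA, hcond]
      rw [hstep, ih (d :: t) (by simp only [List.length_cons]; omega) _ (tot + 1 + 1 + 1) n
        (by simp only [List.length_cons]; push_cast at hn ⊢; omega)]
      rw [show chunksB (a :: b :: c :: d :: t) =
            (a :: b :: c :: d :: t).take 3 :: chunksB ((a :: b :: c :: d :: t).drop 3) from by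
        rw [chunksB]; simp]
      rw [joinComma_cons _ _ (chunksB_ne_nil _)]
      simp

-- ===== VERDICT (by name: the statement is the Claim_ definition above) =====
theorem add_thousand_separator_spec : Claim_equal_add_thousand_separator := by
  intro number _
  unfold Spec_add_thousand_separator add_thousand_separator add_thousand_separator_alt
  exact congrArg String.mk
    (loopA_eq (PySem.Int.toChars number).length _ (le_refl _) [] 0 _ (by simp))
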